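-- pv_equiv track=rewrite | github.com/JackCapstaff/legal_tracker | app.py | compute_monthly_counts
-- ===== SOURCE A (Python) =====
-- from collections import defaultdict, Counter
--
-- def month_key(date_str):
--     # Expects YYYY-MM-DD; returns 'YYYY-MM'
--     try:
--         return date_str[:7]
--     except Exception:
--         return ""
--
-- def is_closed(m):
--     """Treat common ‘closed’ synonyms as closed."""
--     s = str(m.get("Overall Status", "") or "").strip().lower()
--     # exact/contains match for common variations
--     return (
--         s == "closed"
--         or "close" in s
--         or "complete" in s
--         or "executed" in s
--         or "signed" in s
--         or s == "done"
--     )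
--
-- def compute_monthly_counts(matters):
--     """
--     Monthly counts keyed by the *Date Received* month.
--     - New Contracts: count of matters received that month.
--     - Closed Contracts: count of matters whose status indicates closed (see is_closed),
--       bucketed in the *same receipt month*.
--     - Rolling Open: cumulative (new - closed).
--     """
--     by_month_new = Counter()
--     by_month_closed = Counter()
--
--     for m in matters:
--         mk = month_key(m.get("Date Received", "") or "")
--         if not mk:
--             continue
--         by_month_new[mk] += 1
--         if is_closed(m):
--             by_month_closed[mk] += 1
--
--     months = sorted(set(by_month_new.keys()) | set(by_month_closed.keys()))
--     new_vals = [by_month_new.get(m, 0) for m in months]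
--     closed_vals = [by_month_closed.get(m, 0) for m in months]
--
--     rolling = []
--     running = 0
--     for m in months:
--         running += by_month_new.get(m, 0) - by_month_closed.get(m, 0)
--         rolling.append(running)
--
--     return months, new_vals, closed_vals, rolling
-- ===== SOURCE B (Python) =====
-- from itertools import groupby
--
-- def month_key(date_str):
--     # Expects YYYY-MM-DD; returns 'YYYY-MM'
--     try:
--         return date_str[:7]
--     except Exception:
--         return ""
--
-- def is_closed(m):
--     """Treat common 'closed' synonyms as closed."""
--     s = str(m.get("Overall Status", "") or "").strip().lower()
--     return (
--         s == "closed"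
--         or "close" in s
--         or "complete" in s
--         or "executed" in s
--         or "signed" in s
--         or s == "done"
--     )
--
-- def compute_monthly_counts(matters):
--     # Sort-and-group instead of two Counters + key sort.
--     keyed = [(month_key(m.get("Date Received", "") or ""), m) for m in matters]
--     keyed = [(k, m) for (k, m) in keyed if k]
--     keyed.sort(key=lambda km: km[0])
--     months, new_vals, closed_vals, rolling = [], [], [], []
--     running = 0
--     for mk, grp in groupby(keyed, key=lambda km: km[0]):
--         ms = [m for _, m in grp]
--         n = len(ms)
--         c = sum(1 for m in ms if is_closed(m))
--         months.append(mk)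
--         new_vals.append(n)
--         closed_vals.append(c)
--         running += n - c
--         rolling.append(running)
--     return months, new_vals, closed_vals, rolling
-- ===== Notes on version B (the rewrite author's own statement) =====
-- stated objective: alternative
-- what changed: Replaces the two Counter dicts plus a separate set-union/sort pass by computing each matter's month key once, sorting the keyed matters, and walking them with itertools.groupby, producing all four output lists (including the rolling total) in one grouped pass.
import Mathlib
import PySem

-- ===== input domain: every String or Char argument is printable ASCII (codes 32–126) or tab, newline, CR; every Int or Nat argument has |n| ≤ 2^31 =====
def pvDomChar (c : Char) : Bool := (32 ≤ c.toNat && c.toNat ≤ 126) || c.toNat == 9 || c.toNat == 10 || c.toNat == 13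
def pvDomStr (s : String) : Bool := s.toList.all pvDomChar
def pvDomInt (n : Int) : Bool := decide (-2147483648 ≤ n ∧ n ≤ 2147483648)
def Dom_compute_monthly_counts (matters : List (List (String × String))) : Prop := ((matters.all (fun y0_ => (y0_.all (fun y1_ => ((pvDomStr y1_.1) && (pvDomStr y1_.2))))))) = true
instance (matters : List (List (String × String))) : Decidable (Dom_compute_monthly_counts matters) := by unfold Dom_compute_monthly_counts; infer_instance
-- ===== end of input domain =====

-- B replaces A's two Counters + set-union sort by sort-then-groupby in one pass; same outputs, alternative structure (no speed claim).

-- ===== PORT A =====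
-- shared module helpers (used by both Pythons)
-- m.get(k, "") on the dict m (duplicate keys: last wins, as in Python dict construction)
def pvGet (m : List (String × String)) (k : String) : String :=
  PySem.Dict.getD (PySem.Dict.ofList m) k ""

-- `v or ""` on a string value
def pvOrEmpty (v : String) : String := if v == "" then "" else v

-- month_key: date_str[:7]; the try/except never fires on strings
def month_key (date_str : String) : String :=
  PySem.Str.slice date_str none (some 7)

def is_closed (m : List (String × String)) : Bool :=
  let s := PySem.Str.lower (PySem.Str.strip (pvOrEmpty (pvGet m "Overall Status")))
  (s == "closed") || PySem.Str.isIn "close" s || PySem.Str.isIn "complete" s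
    || PySem.Str.isIn "executed" s || PySem.Str.isIn "signed" s || (s == "done")

-- month_key(m.get("Date Received","") or "") — shared subexpression of both Pythons
def pvRecvKey (m : List (String × String)) : String :=
  month_key (pvOrEmpty (pvGet m "Date Received"))

-- the body of A's first loop (one matter: bump the counters)
def pvStepA (acc : PySem.Dict String Int × PySem.Dict String Int)
    (m : List (String × String)) : PySem.Dict String Int × PySem.Dict String Int :=
  let mk := pvRecvKey m
  if mk == "" then acc
  else (acc.1.modify mk 0 (· + 1),
        if is_closed m then acc.2.modify mk 0 (· + 1) else acc.2)

def compute_monthly_counts (matters : List (List (String × String))) :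
    List String × List Int × List Int × List Int :=
  let dicts := matters.foldl pvStepA (PySem.Dict.empty, PySem.Dict.empty)
  let by_month_new := dicts.1
  let by_month_closed := dicts.2
  let months := PySem.List.sorted
    (PySem.Set.union (PySem.Set.ofList by_month_new.keys) (PySem.Set.ofList by_month_closed.keys))
    (fun x => x) false
  let new_vals := months.map (fun k => by_month_new.getD k 0)
  let closed_vals := months.map (fun k => by_month_closed.getD k 0)
  let roll := months.foldl
    (fun (p : Int × List Int) k =>
      let r := p.1 + (by_month_new.getD k 0 - by_month_closed.getD k 0)
      (r, p.2 ++ [r])) ((0 : Int), ([] : List Int))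
  (months, new_vals, closed_vals, roll.2)

-- ===== PORT B =====
-- itertools.groupby over a key-sorted list: contiguous runs of equal keys
def pvGroups (ps : List (String × List (String × String))) :
    List (String × List (List (String × String))) :=
  match ps with
  | [] => []
  | (k, m) :: rest =>
    (k, m :: (rest.takeWhile (fun p => p.1 == k)).map Prod.snd) ::
      pvGroups (rest.dropWhile (fun p => p.1 == k))
termination_by ps.length
decreasing_by
  exact Nat.lt_succ_of_le (List.length_dropWhile_le _ _)

-- the body of B's groupby loop (one group: append month, counts, rolling)
def pvStepB (acc : List String × List Int × List Int × List Int × Int)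
    (kg : String × List (List (String × String))) :
    List String × List Int × List Int × List Int × Int :=
  let n : Int := kg.2.length
  let c : Int := kg.2.countP is_closed
  let r := acc.2.2.2.2 + (n - c)
  (acc.1 ++ [kg.1], acc.2.1 ++ [n], acc.2.2.1 ++ [c], acc.2.2.2.1 ++ [r], r)

def compute_monthly_counts_alt (matters : List (List (String × String))) :
    List String × List Int × List Int × List Int :=
  let keyed := (matters.map (fun m => (pvRecvKey m, m))).filter (fun km => !(km.1 == ""))
  let sortedK := PySem.List.sorted keyed (fun km => km.1) false
  let step := (pvGroups sortedK).foldl pvStepB ([], [], [], [], 0)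
  (step.1, step.2.1, step.2.2.1, step.2.2.2.1)

-- ===== PRECONDITION & SPEC =====
def Spec_compute_monthly_counts (matters : List (List (String × String))) (out : List String × List Int × List Int × List Int) : Prop := out = compute_monthly_counts_alt matters
instance (matters : List (List (String × String))) (out : List String × List Int × List Int × List Int) : Decidable (Spec_compute_monthly_counts matters out) := by unfold Spec_compute_monthly_counts; infer_instance

-- ===== CLAIM (what is proved, stated in full; the proofs are below) =====
def Claim_equal_compute_monthly_counts : Prop := ∀ (matters : List (List (String × String))), Dom_compute_monthly_counts matters → Spec_compute_monthly_counts matters (compute_monthly_counts matters)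

-- ===== LEMMAS AND PROOFS =====

def pvL1 (matters : List (List (String × String))) : List String :=
  (matters.map pvRecvKey).filter (fun s => !(s == ""))

def pvLC (matters : List (List (String × String))) : List String :=
  (matters.filter (fun m => !(pvRecvKey m == "") && is_closed m)).map pvRecvKey

-- group keys membership
theorem pvGroups_keys_mem (ps : List (String × List (String × String))) (k : String) :
    k ∈ (pvGroups ps).map Prod.fst ↔ k ∈ ps.map Prod.fst := by
  induction ps using pvGroups.induct with
  | case1 => simp [pvGroups]
  | case2 k0 m rest ih =>
    rw [pvGroups]
    simp only [List.map_cons, List.mem_cons, ih]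
    constructor
    · rintro (h | h)
      · exact Or.inl h
      · right
        have := List.dropWhile_sublist (l := rest) (p := fun p => p.1 == k0)
        exact (this.map Prod.fst).mem h
    · rintro (h | h)
      · exact Or.inl h
      · rcases List.mem_map.1 h with ⟨p, hp, rfl⟩
        rw [← List.takeWhile_append_dropWhile (p := fun p => p.1 == k0) (l := rest)] at hp
        rcases List.mem_append.1 hp with h1 | h2
        · left; simpa using (List.mem_takeWhile_imp h1)
        · right; exact List.mem_map_of_mem h2

-- in a key-sorted list whose keys are all ≥ k, the key-k block is an initial run
theorem pvFilterTake (l : List (String × List (String × String))) (k : String)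
    (hlb : ∀ p ∈ l, k ≤ p.1) (hs : l.Pairwise (fun a b => a.1 ≤ b.1)) :
    l.filter (fun p => p.1 == k) = l.takeWhile (fun p => p.1 == k) := by
  induction l with
  | nil => rfl
  | cons p l ih =>
    by_cases hp : (p.1 == k) = true
    · simp only [List.filter_cons, List.takeWhile_cons, hp, if_true]
      rw [ih (fun q hq => hlb q (List.mem_cons_of_mem _ hq)) (hs.sublist (List.sublist_cons_self _ _))]
    · have hk : k < p.1 :=
        lt_of_le_of_ne (hlb p (List.mem_cons_self)) (fun h => hp (by simp [← h]))
      simp only [List.filter_cons, List.takeWhile_cons, hp, if_false, Bool.false_eq_true]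
      rw [List.filter_eq_nil_iff.2]
      intro q hq
      have hq1 := (List.pairwise_cons.1 hs).1 q hq
      simp only [beq_iff_eq]
      exact fun h => absurd (h ▸ (lt_of_lt_of_le hk hq1)) (lt_irrefl _)

theorem pvDropGt (l : List (String × List (String × String))) (k : String)
    (hlb : ∀ p ∈ l, k ≤ p.1) (hs : l.Pairwise (fun a b => a.1 ≤ b.1)) :
    ∀ p ∈ l.dropWhile (fun p => p.1 == k), k < p.1 := by
  induction l with
  | nil => simp
  | cons p l ih =>
    by_cases hp : (p.1 == k) = true
    · simp only [List.dropWhile_cons, hp, if_true]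
      exact ih (fun q hq => hlb q (List.mem_cons_of_mem _ hq)) (hs.sublist (List.sublist_cons_self _ _))
    · have hp' : (p.1 == k) = false := by simpa using hp
      simp only [List.dropWhile_cons, hp', Bool.false_eq_true, if_false]
      intro q hq
      have hk : k < p.1 :=
        lt_of_le_of_ne (hlb p (List.mem_cons_self)) (fun h => hp (by simp [← h]))
      rcases List.mem_cons.1 hq with rfl | hq'
      · exact hk
      · exact lt_of_lt_of_le hk ((List.pairwise_cons.1 hs).1 q hq')

theorem pvGroups_pairwise (ps : List (String × List (String × String)))
    (hs : ps.Pairwise (fun a b => a.1 ≤ b.1)) :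
    ((pvGroups ps).map Prod.fst).Pairwise (· < ·) := by
  induction ps using pvGroups.induct with
  | case1 => simp [pvGroups]
  | case2 k0 m rest ih =>
    rw [pvGroups]
    have hlb : ∀ p ∈ rest, k0 ≤ p.1 := fun p hp => (List.pairwise_cons.1 hs).1 p hp
    have hrest : rest.Pairwise (fun a b => a.1 ≤ b.1) := (List.pairwise_cons.1 hs).2
    have hdrop : (rest.dropWhile (fun p => p.1 == k0)).Pairwise (fun a b => a.1 ≤ b.1) :=
      hrest.sublist (List.dropWhile_sublist _)
    simp only [List.map_cons, List.pairwise_cons]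
    refine ⟨?_, ih hdrop⟩
    intro k' hk'
    rcases List.mem_map.1 ((pvGroups_keys_mem _ _).1 hk') with ⟨p, hp, rfl⟩
    exact pvDropGt rest k0 hlb hrest p hp

theorem pvGroups_content (ps : List (String × List (String × String)))
    (hs : ps.Pairwise (fun a b => a.1 ≤ b.1)) :
    ∀ kg ∈ pvGroups ps, kg.2 = (ps.filter (fun p => p.1 == kg.1)).map Prod.snd := by
  induction ps using pvGroups.induct with
  | case1 => simp [pvGroups]
  | case2 k0 m rest ih =>
    have hlb : ∀ p ∈ rest, k0 ≤ p.1 := fun p hp => (List.pairwise_cons.1 hs).1 p hp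
    have hrest : rest.Pairwise (fun a b => a.1 ≤ b.1) := (List.pairwise_cons.1 hs).2
    have hdrop : (rest.dropWhile (fun p => p.1 == k0)).Pairwise (fun a b => a.1 ≤ b.1) :=
      hrest.sublist (List.dropWhile_sublist _)
    rw [pvGroups]
    intro kg hkg
    rcases List.mem_cons.1 hkg with rfl | htail
    · simp only [List.filter_cons, beq_self_eq_true, if_true, List.map_cons]
      rw [pvFilterTake rest k0 hlb hrest]
    · have hgtk : k0 < kg.1 := by
        have hm : kg.1 ∈ (pvGroups (rest.dropWhile (fun p => p.1 == k0))).map Prod.fst :=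
          List.mem_map_of_mem htail
        rcases List.mem_map.1 ((pvGroups_keys_mem _ _).1 hm) with ⟨p, hp, hpk⟩
        exact hpk ▸ pvDropGt rest k0 hlb hrest p hp
      have hne : ∀ q : String, q = k0 → (q == kg.1) = false := by
        rintro q rfl
        simp only [beq_eq_false_iff_ne, ne_eq]
        exact fun h => absurd (h ▸ hgtk) (lt_irrefl _)
      have hfil : List.filter (fun p => p.1 == kg.1) ((k0, m) :: rest)
          = List.filter (fun p => p.1 == kg.1) (rest.dropWhile (fun p => p.1 == k0)) := by
        rw [List.filter_cons, hne k0 rfl,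
          ← List.takeWhile_append_dropWhile (p := fun p => p.1 == k0) (l := rest),
          List.filter_append, List.filter_eq_nil_iff.2, List.nil_append,
          List.takeWhile_append_dropWhile]
        · simp
        · intro q hq
          have := List.mem_takeWhile_imp hq
          rw [hne q.1 (by simpa using this)]
          simp
      rw [ih hdrop kg htail, hfil]

theorem pvKeyedFst (matters : List (List (String × String))) :
    ((matters.map (fun m => (pvRecvKey m, m))).filter (fun km => !(km.1 == ""))).map Prod.fst
      = pvL1 matters := by
  induction matters with
  | nil => rfl
  | cons m rest ih =>
    by_cases h : (pvRecvKey m == "") = true <;>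
      simp [pvL1, h] <;> simpa [pvL1] using ih

theorem pvLC_subset (matters : List (List (String × String))) (x : String)
    (hx : x ∈ pvLC matters) : x ∈ pvL1 matters := by
  rcases List.mem_map.1 hx with ⟨m, hm, rfl⟩
  rcases List.mem_filter.1 hm with ⟨hmem, hcond⟩
  simp only [Bool.and_eq_true] at hcond
  exact List.mem_filter.2 ⟨List.mem_map_of_mem hmem, hcond.1⟩

theorem pvLastAux (l : List Int) (x r : Int) :
    l.getLastD x = (x :: l).getLastD r := by
  rw [List.getLastD_cons]

-- rolling lists
def pvRollF (f g : String → Int) : Int → List String → List Int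
  | _, [] => []
  | r, k :: t => (r + (f k - g k)) :: pvRollF f g (r + (f k - g k)) t

def pvRollG : Int → List (String × List (List (String × String))) → List Int
  | _, [] => []
  | r, kg :: t =>
    (r + ((kg.2.length : Int) - (kg.2.countP is_closed : Int))) ::
      pvRollG (r + ((kg.2.length : Int) - (kg.2.countP is_closed : Int))) t

theorem pvFoldRoll (f g : String → Int) (ms : List String) (r0 : Int) (acc : List Int) :
    ms.foldl (fun (p : Int × List Int) k => (p.1 + (f k - g k), p.2 ++ [p.1 + (f k - g k)])) (r0, acc)
    = ((pvRollF f g r0 ms).getLastD r0, acc ++ pvRollF f g r0 ms) := by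
  induction ms generalizing r0 acc with
  | nil => simp [pvRollF]
  | cons k t ih =>
    simp only [List.foldl_cons, pvRollF, ih, List.append_assoc, List.singleton_append]
    rw [pvLastAux _ _ r0]

theorem pvFoldB (gs : List (String × List (List (String × String))))
    (xs : List String) (as bs rs : List Int) (r : Int) :
    gs.foldl pvStepB (xs, as, bs, rs, r)
    = (xs ++ gs.map Prod.fst,
       as ++ gs.map (fun kg => (kg.2.length : Int)),
       bs ++ gs.map (fun kg => (kg.2.countP is_closed : Int)),
       rs ++ pvRollG r gs,
       (pvRollG r gs).getLastD r) := by
  induction gs generalizing xs as bs rs r with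
  | nil => simp [pvRollG]
  | cons kg t ih =>
    simp only [List.foldl_cons, pvStepB, pvRollG, ih, List.map_cons, List.append_assoc,
      List.singleton_append]
    rw [pvLastAux _ _ r]

theorem pvRoll_congr (gs : List (String × List (List (String × String))))
    (f g : String → Int)
    (h : ∀ kg ∈ gs, (kg.2.length : Int) = f kg.1 ∧ (kg.2.countP is_closed : Int) = g kg.1)
    (r : Int) : pvRollG r gs = pvRollF f g r (gs.map Prod.fst) := by
  induction gs generalizing r with
  | nil => rfl
  | cons kg t ih =>
    have hh := h kg (List.mem_cons_self)
    simp only [pvRollG, pvRollF, List.map_cons, hh.1, hh.2]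
    exact congrArg _ (ih (fun q hq => h q (List.mem_cons_of_mem _ hq)) _)

theorem pvFoldA (matters : List (List (String × String)))
    (d1 d2 : PySem.Dict String Int) :
    matters.foldl pvStepA (d1, d2)
    = ((pvL1 matters).foldl (fun d x => d.modify x 0 (· + 1)) d1,
       (pvLC matters).foldl (fun d x => d.modify x 0 (· + 1)) d2) := by
  induction matters generalizing d1 d2 with
  | nil => rfl
  | cons m rest ih =>
    rw [List.foldl_cons]
    by_cases hk : (pvRecvKey m == "") = true
    · rw [show pvStepA (d1, d2) m = (d1, d2) from by simp [pvStepA, hk], ih]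
      simp [pvL1, pvLC, hk]
    · by_cases hc : is_closed m = true
      · rw [show pvStepA (d1, d2) m
            = (d1.modify (pvRecvKey m) 0 (· + 1), d2.modify (pvRecvKey m) 0 (· + 1)) from by
              simp [pvStepA, hk, hc], ih]
        simp [pvL1, pvLC, hk, hc]
      · rw [show pvStepA (d1, d2) m
            = (d1.modify (pvRecvKey m) 0 (· + 1), d2) from by simp [pvStepA, hk, hc], ih]
        simp [pvL1, pvLC, hk, hc]

theorem pvDictsEq (matters : List (List (String × String))) :
    matters.foldl pvStepA (PySem.Dict.empty, PySem.Dict.empty)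
    = (PySem.Dict.counter (pvL1 matters), PySem.Dict.counter (pvLC matters)) := by
  rw [pvFoldA]; rfl

set_option maxHeartbeats 1000000 in
theorem pvMain (matters : List (List (String × String))) :
    compute_monthly_counts matters = compute_monthly_counts_alt matters := by
  have hKF := pvKeyedFst matters
  set keyed := (matters.map (fun m => (pvRecvKey m, m))).filter (fun km => !(km.1 == "")) with hkeyed
  set sortedK := PySem.List.sorted keyed (fun km => km.1) false with hsortedK
  have hsort : sortedK.Pairwise (fun a b => a.1 ≤ b.1) := PySem.List.sorted_pairwise keyed _
  have hperm : sortedK.Perm keyed := PySem.List.sorted_perm keyed _ _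
  set gs := pvGroups sortedK with hgs
  set gk := gs.map Prod.fst with hgk
  have hkey1 : ∀ k, k ∈ gk ↔ k ∈ pvL1 matters := by
    intro k
    rw [hgk, hgs, pvGroups_keys_mem, ← hKF]
    exact (hperm.map Prod.fst).mem_iff
  -- counts transported from the sorted keyed list to A's counters
  have hn : ∀ k : String, ((sortedK.countP (fun p => p.1 == k) : Nat) : Int)
      = (PySem.Dict.counter (pvL1 matters)).getD k 0 := by
    intro k
    rw [PySem.Dict.getD_counter, hperm.countP_eq, hkeyed]
    congr 1
    simp only [List.countP_filter, List.countP_map, pvL1, List.count_eq_countP]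
    apply List.countP_congr
    intro m _
    simp [Function.comp]
  have hc : ∀ k : String, ((sortedK.countP (fun p => is_closed p.2 && (p.1 == k)) : Nat) : Int)
      = (PySem.Dict.counter (pvLC matters)).getD k 0 := by
    intro k
    rw [PySem.Dict.getD_counter, hperm.countP_eq, hkeyed]
    congr 1
    simp only [List.countP_filter, List.countP_map, pvLC, List.count_eq_countP]
    apply List.countP_congr
    intro m _
    by_cases h1 : (pvRecvKey m == k) = true <;> by_cases h2 : is_closed m = true <;>
      simp [Function.comp, h1, h2, Bool.and_comm]
  have hgrp := pvGroups_content sortedK hsort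
  have hfacts : ∀ kg ∈ gs,
      ((kg.2.length : Int) = (PySem.Dict.counter (pvL1 matters)).getD kg.1 0) ∧
      ((kg.2.countP is_closed : Int) = (PySem.Dict.counter (pvLC matters)).getD kg.1 0) := by
    intro kg hkg
    rw [hgrp kg hkg]
    constructor
    · rw [List.length_map, ← List.countP_eq_length_filter]
      exact hn kg.1
    · rw [List.countP_map, List.countP_filter, ← hc kg.1]
      exact congrArg (fun n : Nat => (n : Int))
        (List.countP_congr (fun p _ => by simp [Function.comp]))
  -- A's months list is exactly the group keys
  have hnodupgk : gk.Nodup := (pvGroups_pairwise sortedK hsort).imp (fun h => ne_of_lt h)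
  have hmonths : PySem.List.sorted
      ((PySem.Set.ofList (PySem.Dict.counter (pvL1 matters)).keys).union
        (PySem.Set.ofList (PySem.Dict.counter (pvLC matters)).keys)) (fun x => x) = gk := by
    rw [PySem.Dict.keys_counter, PySem.Dict.keys_counter, PySem.Set.ofList_ofList,
      PySem.Set.ofList_ofList]
    apply PySem.List.sorted_eq_of_perm_of_pairwise_lt
    · refine (List.perm_ext_iff_of_nodup hnodupgk ?_).2 ?_
      · exact PySem.Set.nodup_union _ _ (PySem.Set.nodup_ofList _)
      · intro a
        rw [hkey1 a, PySem.Set.mem_union, PySem.Set.mem_ofList, PySem.Set.mem_ofList]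
        exact ⟨fun h => Or.inl h, fun h => h.elim id (pvLC_subset matters a)⟩
    · exact pvGroups_pairwise sortedK hsort
  -- assemble
  simp only [compute_monthly_counts, compute_monthly_counts_alt]
  rw [pvDictsEq]
  simp only [← hkeyed, ← hsortedK, ← hgs]
  rw [hmonths,
    pvFoldRoll (fun k => (PySem.Dict.counter (pvL1 matters)).getD k 0)
      (fun k => (PySem.Dict.counter (pvLC matters)).getD k 0) gk 0 [],
    pvFoldB]
  simp only [List.nil_append, List.map_map, hgk]
  refine congrArg₂ Prod.mk rfl (congrArg₂ Prod.mk ?_ (congrArg₂ Prod.mk ?_ ?_))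
  · exact List.map_congr_left (fun kg hkg => ((hfacts kg hkg).1).symm)
  · exact List.map_congr_left (fun kg hkg => ((hfacts kg hkg).2).symm)
  · exact (pvRoll_congr gs
      (fun k => (PySem.Dict.counter (pvL1 matters)).getD k 0)
      (fun k => (PySem.Dict.counter (pvLC matters)).getD k 0) hfacts 0).symm

-- ===== VERDICT (by name: the statement is the Claim_ definition above) =====
theorem compute_monthly_counts_spec : Claim_equal_compute_monthly_counts := by
  intro matters _
  exact pvMain matters
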